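-- pv_equiv track=rewrite | github.com/Diasiare/AdventOfCode2023 | day18.py | calcVolume
-- ===== SOURCE A (Python) =====
-- def addVolume(startX, endX, startY, endY, s, c):
--     return
--     for y in range(startY, endY + 1):
--         for x in range(startX, endX + 1):
--             s[(y, x)] = c
--
-- seen = {}
--
-- def toLines(segments):
--     out = []
--     volume = 0
--     for  i,part in enumerate(segments):
--         start, end, _ = part
--         if start[0] == end[0]:
--             volume += abs(start[1] - end[1]) + 1
--             before = segments[i - 1]
--             after = segments[(i + 1) % len(segments)]
--             out.append((min(start[1], end[1]), max(start[1], end[1]) , end[0], end[0], before[2] == after[2]))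
--         else:
--             xValue = min(start[1], end[1])
--             yValues = [start[0], end[0]]
--             yValues.sort()
--
--             out.append((xValue, xValue, yValues[0] + 1, yValues[1] - 1, True))
--             volume += yValues[1] - yValues[0] - 1
--     out.sort()
--     for startX, endX, yStart, yEnd, _ in out:
--         addVolume(startX, endX, yStart, yEnd, seen, '#')
--     return (out, volume)
--
-- def segmentLineByLine(line1, line2):
--     s1, e1 = line1
--     s2, e2 = line2
--     if e1 < s2:
--         return None
--     if e2 < s1:
--         return None
--
--     segments = []
--     if s1 < s2:
--         segments.append((s1, s2 - 1))
--         s1 = s2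
--     if e1 > e2:
--         segments.append((e2 + 1, e1))
--         e1 = e2
--
--     return ((s1, e1), segments)
--
-- def calcVolume(segments):
--     lines, volume = toLines(segments)
--     minX = lines[0][0]
--     minY = min([x[2] for x in lines])
--     maxY = max([x[3] for x in lines])
--     # ((yStart, yEnd), x for previous, isInside)
--     startLine = ((minY, maxY), minX - 1, False)
--     trackingLines = [startLine]
--
--     for vline in lines:
--         newLines = []
--         for line in trackingLines:
--             band, startX, inside = line
--             segments = segmentLineByLine(band, (vline[2], vline[3]))
--             if segments == None:
--                 newLines.append(line)
--             else:
--                 hit, rest = segments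
--                 for r in rest:
--                     newLines.append((r, startX, inside))
--                 newLines.append((hit, vline[1], not inside if vline[4] else inside))
--                 if inside:
--                     length = hit[1] - hit[0] + 1
--                     width =  vline[0] - startX - 1
--                     volume += length * width
--                     addVolume(startX + 1, vline[0] - 1, hit[0], hit[1], seen, 'O')
--
--
--         trackingLines = newLines
--     return volume
-- ===== SOURCE B (Python) =====
-- def calcVolume(segments):
--     # build the sweep lines from the segment list zipped with its two rotations
--     entries = []
--     volume = 0
--     prevs = segments[-1:] + segments[:-1]
--     nexts = segments[1:] + segments[:1]
--     for part, before, after in zip(segments, prevs, nexts):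
--         (sy, sx), (ey, ex), _ = part
--         if sy == ey:
--             entries.append((min(sx, ex), max(sx, ex), ey, ey, before[2] == after[2]))
--             volume += abs(sx - ex) + 1
--         else:
--             lo, hi = min(sy, ey), max(sy, ey)
--             entries.append((min(sx, ex), min(sx, ex), lo + 1, hi - 1, True))
--             volume += hi - lo - 1
--     lines = sorted(entries)
--     px0 = lines[0][0] - 1
--     # coordinate-compressed row strips: rows between consecutive cuts behave alike,
--     # so scan the sorted lines once per strip with a scalar (px, inside) state
--     cuts = sorted({c for _, _, y0, y1, _ in lines for c in (y0, y1 + 1)})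
--     for c, d in zip(cuts, cuts[1:]):
--         px, inside = px0, False
--         for x0, x1, y0, y1, flip in lines:
--             if y0 <= c and d <= y1 + 1:
--                 if inside:
--                     volume += (d - c) * (x0 - px - 1)
--                 px = x1
--                 inside = inside != flip
--     return volume
-- ===== Notes on version B (the rewrite author's own statement) =====
-- stated objective: alternative
-- what changed: B replaces A's sweep that maintains a growing list of y-bands and splits each band against every line (via the mutating segmentLineByLine helper) by a coordinate-compressed strip scan: it collects the distinct cut ordinates, and for each strip between consecutive cuts rescans the sorted lines once with a scalar (px, inside) state, adding strip-height times width per crossing — no band list and no interval splitting exist in B.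
import Mathlib
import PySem

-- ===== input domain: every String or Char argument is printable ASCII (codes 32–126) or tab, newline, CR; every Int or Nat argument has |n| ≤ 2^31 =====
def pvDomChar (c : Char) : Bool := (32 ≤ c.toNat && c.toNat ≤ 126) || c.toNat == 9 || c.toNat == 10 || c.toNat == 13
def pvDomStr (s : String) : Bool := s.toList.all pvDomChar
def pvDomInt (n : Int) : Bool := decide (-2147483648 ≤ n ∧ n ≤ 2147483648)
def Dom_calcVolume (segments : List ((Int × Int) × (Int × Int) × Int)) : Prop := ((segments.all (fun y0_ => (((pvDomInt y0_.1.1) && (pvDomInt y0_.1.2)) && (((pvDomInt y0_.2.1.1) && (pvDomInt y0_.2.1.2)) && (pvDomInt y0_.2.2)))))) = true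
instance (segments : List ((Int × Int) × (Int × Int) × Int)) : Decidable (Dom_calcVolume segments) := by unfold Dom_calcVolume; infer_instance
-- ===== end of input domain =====

-- B replaces A's growing band-list sweep (interval splitting via segmentLineByLine) by a
-- coordinate-compressed strip scan: rows between consecutive cut lines behave alike, so B
-- rescans the sorted lines once per strip with a scalar (px, inside) state; objective:
-- an alternative algorithm with no interval-splitting data structure.

abbrev PvSeg := (Int × Int) × (Int × Int) × Int
abbrev PvEntry := Int × Int × Int × Int × Bool
abbrev PvBand := (Int × Int) × Int × Bool

-- ===== PORT A =====
def pvSegDefault : PvSeg := ((0, 0), (0, 0), 0)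
def pvEntryDefault : PvEntry := (0, 0, 0, 0, false)

-- Python sorts the 5-tuples lexicographically; this packed integer key realises that
-- order exactly for the values Dom_calcVolume admits (all components have |v| ≤ 2^31 + 1).
def pvKey (e : PvEntry) : Int :=
  ((((e.1 * 2 ^ 40 + e.2.1) * 2 ^ 40 + e.2.2.1) * 2 ^ 40 + e.2.2.2.1) * 2) +
    (if e.2.2.2.2 then 1 else 0)

def toLines (segments : List PvSeg) : List PvEntry × Int :=
  let n : Int := (segments.length : Int)
  let st := (PySem.List.enumerate segments 0).foldl
    (fun (s : List PvEntry × Int) ip =>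
      let i := ip.1
      let start := ip.2.1
      let end_ := ip.2.2.1
      if start.1 = end_.1 then
        let before := PySem.List.pyGetD segments (i - 1) pvSegDefault
        let after := PySem.List.pyGetD segments (PySem.Int.mod (i + 1) n) pvSegDefault
        (s.1 ++ [(min start.2 end_.2, max start.2 end_.2, end_.1, end_.1,
                   before.2.2 == after.2.2)],
         s.2 + (|start.2 - end_.2| + 1))
      else
        let xValue := min start.2 end_.2
        let yValues := PySem.List.sorted [start.1, end_.1] (fun y => y) false
        (s.1 ++ [(xValue, xValue, PySem.List.pyGetD yValues 0 0 + 1,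
                   PySem.List.pyGetD yValues 1 0 - 1, true)],
         s.2 + (PySem.List.pyGetD yValues 1 0 - PySem.List.pyGetD yValues 0 0 - 1)))
    ([], 0)
  (PySem.List.sorted st.1 pvKey false, st.2)

def segmentLineByLine (line1 line2 : Int × Int) :
    Option ((Int × Int) × List (Int × Int)) :=
  if line1.2 < line2.1 then none
  else if line2.2 < line1.1 then none
  else
    let segs : List (Int × Int) := []
    let p1 := if line1.1 < line2.1 then (line2.1, segs ++ [(line1.1, line2.1 - 1)])
              else (line1.1, segs)
    let p2 := if line1.2 > line2.2 then (line2.2, p1.2 ++ [(line2.2 + 1, line1.2)])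
              else (line1.2, p1.2)
    some ((p1.1, p2.1), p2.2)

def calcVolume (segments : List PvSeg) : Int :=
  let tl := toLines segments
  let lines := tl.1
  let minX := (PySem.List.pyGetD lines 0 pvEntryDefault).1
  let minY := (PySem.List.min? (lines.map (fun x => x.2.2.1)) (fun y => y)).getD 0
  let maxY := (PySem.List.max? (lines.map (fun x => x.2.2.2.1)) (fun y => y)).getD 0
  let startLine : PvBand := ((minY, maxY), minX - 1, false)
  let final := lines.foldl
    (fun (st : List PvBand × Int) vline =>
      st.1.foldl
        (fun (s : List PvBand × Int) line =>
          match segmentLineByLine line.1 (vline.2.2.1, vline.2.2.2.1) with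
          | none => (s.1 ++ [line], s.2)
          | some hr =>
            let s' := (s.1 ++ hr.2.map (fun r => (r, line.2.1, line.2.2)) ++
                        [(hr.1, vline.2.1,
                          if vline.2.2.2.2 then !line.2.2 else line.2.2)], s.2)
            if line.2.2 then
              (s'.1, s'.2 + (hr.1.2 - hr.1.1 + 1) * (vline.1 - line.2.1 - 1))
            else s')
        ([], st.2))
    ([startLine], tl.2)
  final.2

-- ===== PORT B =====
def calcVolume_alt (segments : List PvSeg) : Int :=
  let prevs := PySem.List.slice segments (some (-1)) none ++
               PySem.List.slice segments none (some (-1))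
  let nexts := PySem.List.slice segments (some 1) none ++
               PySem.List.slice segments none (some 1)
  let st := (segments.zip (prevs.zip nexts)).foldl
    (fun (s : List PvEntry × Int) t =>
      let sy := t.1.1.1; let sx := t.1.1.2
      let ey := t.1.2.1.1; let ex := t.1.2.1.2
      let before := t.2.1; let after := t.2.2
      if sy = ey then
        (s.1 ++ [(min sx ex, max sx ex, ey, ey, before.2.2 == after.2.2)],
         s.2 + (|sx - ex| + 1))
      else
        (s.1 ++ [(min sx ex, min sx ex, min sy ey + 1, max sy ey - 1, true)],
         s.2 + (max sy ey - min sy ey - 1)))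
    ([], 0)
  let lines := PySem.List.sorted st.1 pvKey false
  let px0 := (PySem.List.pyGetD lines 0 pvEntryDefault).1 - 1
  -- cuts = sorted({y0, y1+1 for each line}), the compressed row boundaries
  let cuts := PySem.List.sorted
    (PySem.Set.ofList (lines.flatMap (fun l => [l.2.2.1, l.2.2.2.1 + 1])))
    (fun y => y) false
  (cuts.zip cuts.tail).foldl
    (fun (v : Int) cd =>
      (lines.foldl
        (fun (s : Int × Bool × Int) l =>
          if l.2.2.1 ≤ cd.1 ∧ cd.2 ≤ l.2.2.2.1 + 1 then
            (l.2.1, s.2.1 != l.2.2.2.2,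
             s.2.2 + (if s.2.1 then (cd.2 - cd.1) * (l.1 - s.1 - 1) else 0))
          else s)
        (px0, false, v)).2.2)
    st.2

-- ===== PRECONDITION & SPEC =====
-- Pre_ excludes only the empty list, on which Python A raises IndexError (lines[0]).
def Pre_calcVolume (segments : List ((Int × Int) × (Int × Int) × Int)) : Prop :=
  segments ≠ []
instance (segments : List ((Int × Int) × (Int × Int) × Int)) : Decidable (Pre_calcVolume segments) := by
  unfold Pre_calcVolume; infer_instance

def pvWitness_calcVolume : (List ((Int × Int) × (Int × Int) × Int)) :=
  [((0, 0), (0, 6), 0), ((0, 6), (5, 6), 1), ((5, 6), (5, 0), 2), ((5, 0), (0, 0), 3)]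

def Spec_calcVolume (segments : List ((Int × Int) × (Int × Int) × Int)) (out : Int) : Prop := out = calcVolume_alt segments
instance (segments : List ((Int × Int) × (Int × Int) × Int)) (out : Int) : Decidable (Spec_calcVolume segments out) := by unfold Spec_calcVolume; infer_instance

-- ===== CLAIM (what is proved, stated in full; the proofs are below) =====
def Claim_equal_calcVolume : Prop := ∀ (segments : List ((Int × Int) × (Int × Int) × Int)), Dom_calcVolume segments → Pre_calcVolume segments → Spec_calcVolume segments (calcVolume segments)

-- ===== LEMMAS AND PROOFS =====

-- canonical descriptions of what both programs' line-building folds compute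
def pvEntTrip (segments : List PvSeg) (ip : Int × PvSeg) : PvSeg × PvSeg × PvSeg :=
  (ip.2, PySem.List.pyGetD segments (ip.1 - 1) pvSegDefault,
   PySem.List.pyGetD segments (PySem.Int.mod (ip.1 + 1) (segments.length : Int)) pvSegDefault)

def pvEntOf (t : PvSeg × PvSeg × PvSeg) : PvEntry :=
  if t.1.1.1 = t.1.2.1.1 then
    (min t.1.1.2 t.1.2.1.2, max t.1.1.2 t.1.2.1.2, t.1.2.1.1, t.1.2.1.1,
     t.2.1.2.2 == t.2.2.2.2)
  else
    (min t.1.1.2 t.1.2.1.2, min t.1.1.2 t.1.2.1.2, min t.1.1.1 t.1.2.1.1 + 1,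
     max t.1.1.1 t.1.2.1.1 - 1, true)

def pvVolOf (t : PvSeg × PvSeg × PvSeg) : Int :=
  if t.1.1.1 = t.1.2.1.1 then |t.1.1.2 - t.1.2.1.2| + 1
  else max t.1.1.1 t.1.2.1.1 - min t.1.1.1 t.1.2.1.1 - 1

def pvLines (segments : List PvSeg) : List PvEntry :=
  PySem.List.sorted
    ((PySem.List.enumerate segments 0).map (fun ip => pvEntOf (pvEntTrip segments ip)))
    pvKey false

def pvVol0 (segments : List PvSeg) : Int :=
  ((PySem.List.enumerate segments 0).map (fun ip => pvVolOf (pvEntTrip segments ip))).sum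

-- components of A's sweep step
def pvTouch (y0 y1 : Int) (b : PvBand) : Bool := !decide (b.1.2 < y0 ∨ y1 < b.1.1)

def pvRest (y0 y1 : Int) (b : PvBand) : List PvBand :=
  (if b.1.1 < y0 then [((b.1.1, y0 - 1), b.2.1, b.2.2)] else []) ++
  (if b.1.2 > y1 then [((y1 + 1, b.1.2), b.2.1, b.2.2)] else [])

def pvHitA (vl : PvEntry) (b : PvBand) : PvBand :=
  ((max b.1.1 vl.2.2.1, min b.1.2 vl.2.2.2.1), vl.2.1,
   if vl.2.2.2.2 then !b.2.2 else b.2.2)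

def pvPiecesA (vl : PvEntry) (b : PvBand) : List PvBand :=
  if pvTouch vl.2.2.1 vl.2.2.2.1 b then pvRest vl.2.2.1 vl.2.2.2.1 b ++ [pvHitA vl b]
  else [b]

def pvContrib (vl : PvEntry) (b : PvBand) : Int :=
  if b.2.2 then (min b.1.2 vl.2.2.2.1 - max b.1.1 vl.2.2.1 + 1) * (vl.1 - b.2.1 - 1)
  else 0

def pvContribA (vl : PvEntry) (b : PvBand) : Int :=
  if pvTouch vl.2.2.1 vl.2.2.2.1 b then pvContrib vl b else 0

def pvStepA (st : List PvBand × Int) (vl : PvEntry) : List PvBand × Int :=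
  (st.1.flatMap (pvPiecesA vl), st.2 + (st.1.map (pvContribA vl)).sum)

-- per-band total contribution of the remaining sweep
def pvF : List PvEntry → PvBand → Int
  | [], _ => 0
  | L :: ls, b => pvContribA L b + ((pvPiecesA L b).map (pvF ls)).sum

-- per-row state machine: the contribution a single row r makes
def pvRow : List PvEntry → Int → Int × Bool → Int
  | [], _, _ => 0
  | L :: ls, r, st =>
    if L.2.2.1 ≤ r ∧ r ≤ L.2.2.2.1 then
      (if st.2 then L.1 - st.1 - 1 else 0) + pvRow ls r (L.2.1, st.2 != L.2.2.2.2)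
    else pvRow ls r st

-- per-strip state machine (B's inner loop condition)
def pvRowC : List PvEntry → Int → Int → Int × Bool → Int
  | [], _, _, _ => 0
  | L :: ls, c, d, st =>
    if L.2.2.1 ≤ c ∧ d ≤ L.2.2.2.1 + 1 then
      (if st.2 then L.1 - st.1 - 1 else 0) + pvRowC ls c d (L.2.1, st.2 != L.2.2.2.2)
    else pvRowC ls c d st

theorem pvFoldlBuild {α β : Type} (xs : List α) (f : α → List β) (g : α → Int) :
    ∀ (o : List β) (v : Int),
      xs.foldl (fun s x => (s.1 ++ f x, s.2 + g x)) (o, v) =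
        (o ++ xs.flatMap f, v + (xs.map g).sum) := by
  induction xs with
  | nil => intro o v; simp
  | cons a l ih => intro o v; simp [ih, add_assoc]

theorem pvSortedPair (a b : Int) :
    PySem.List.sorted [a, b] (fun y => y) false = [min a b, max a b] := by
  apply PySem.List.sorted_id_eq_of_perm_of_pairwise
  · rcases le_total a b with h | h
    · simp [min_eq_left h, max_eq_right h]
    · simp [min_eq_right h, max_eq_left h]
      exact List.Perm.swap _ _ _
  · simp [List.pairwise_cons]

theorem pvSegLBL (l1 l2 : Int × Int) :
    segmentLineByLine l1 l2 =
      if l1.2 < l2.1 ∨ l2.2 < l1.1 then none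
      else some ((max l1.1 l2.1, min l1.2 l2.2),
        (if l1.1 < l2.1 then [(l1.1, l2.1 - 1)] else []) ++
        (if l1.2 > l2.2 then [(l2.2 + 1, l1.2)] else [])) := by
  unfold segmentLineByLine
  by_cases h1 : l1.2 < l2.1
  · simp [h1]
  · by_cases h2 : l2.2 < l1.1
    · simp [h1, h2]
    · by_cases h3 : l1.1 < l2.1 <;> by_cases h4 : l1.2 > l2.2 <;>
        simp [h1, h2, h3, h4, Prod.ext_iff] <;> omega

theorem pvFlatMapSingleton {α β : Type} (l : List α) (f : α → β) :
    l.flatMap (fun x => [f x]) = l.map f := by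
  induction l with
  | nil => rfl
  | cons a t ih => simp [List.flatMap_cons, ih]

theorem pvPrevElem (L : List PvSeg) (i : Nat) (hi : i < L.length)
    (h : i < (L.drop (L.length - 1) ++ L.dropLast).length) :
    (L.drop (L.length - 1) ++ L.dropLast)[i] =
      PySem.List.pyGetD L ((i : Int) - 1) pvSegDefault := by
  have hl1 : (L.drop (L.length - 1)).length = 1 := by simp; omega
  rw [List.getElem_append]
  split_ifs with h'
  · have hi0 : i = 0 := by omega
    subst hi0
    have hne : L ≠ [] := by intro hh; subst hh; simp at hi
    have hm1 : ((0 : Nat) : Int) - 1 = -1 := by norm_num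
    rw [List.getElem_drop, hm1, PySem.List.pyGetD_neg_one L pvSegDefault hne,
      List.getLast_eq_getElem]
    congr 1
  · have h1 : 1 ≤ i := by omega
    rw [List.getElem_dropLast]
    have : (i : Int) - 1 = ((i - 1 : Nat) : Int) := by omega
    rw [this, PySem.List.pyGetD_natCast, List.getD_eq_getElem]
    · congr 1; omega
    · omega

theorem pvNextElem (L : List PvSeg) (i : Nat) (hi : i < L.length)
    (h : i < (L.tail ++ L.take 1).length) :
    (L.tail ++ L.take 1)[i] =
      PySem.List.pyGetD L (PySem.Int.mod ((i : Int) + 1) (L.length : Int)) pvSegDefault := by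
  have hpos : (0 : Int) < (L.length : Int) := by exact_mod_cast (show 0 < L.length by omega)
  rw [PySem.Int.mod_eq_emod_of_pos hpos]
  rw [List.getElem_append]
  split_ifs with h'
  · rw [List.getElem_tail]
    have hlt : i + 1 < L.length := by simp at h'; omega
    have : ((i : Int) + 1) % (L.length : Int) = ((i + 1 : Nat) : Int) := by
      rw [Int.emod_eq_of_lt (by omega) (by exact_mod_cast hlt)]
      omega
    rw [this, PySem.List.pyGetD_natCast, List.getD_eq_getElem]
  · have hieq : i = L.length - 1 := by simp at h' ⊢; omega
    have : ((i : Int) + 1) % (L.length : Int) = 0 := by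
      have : (i : Int) + 1 = (L.length : Int) := by omega
      rw [this, Int.emod_self]
    rw [this]
    rw [PySem.List.pyGetD_zero, List.getD_eq_getElem]
    · rw [List.getElem_take]
      have h0 : i - (L.length - 1) = 0 := by simp at h'; omega
      simp only [List.length_tail, h0]
    · omega

theorem pvZipRot (segments : List PvSeg) :
    segments.zip
      ((PySem.List.slice segments (some (-1)) none ++
        PySem.List.slice segments none (some (-1))).zip
       (PySem.List.slice segments (some 1) none ++
        PySem.List.slice segments none (some 1))) =
      (PySem.List.enumerate segments 0).map (pvEntTrip segments) := by
  have hs := PySem.List.slice_to (xs := segments) (b := 1) (by norm_num)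
  rw [PySem.List.slice_from_neg_one, PySem.List.slice_to_neg_one,
      PySem.List.slice_from_one, hs, (rfl : (1 : Int).toNat = 1)]
  apply List.ext_getElem
  · simp [PySem.List.length_enumerate]
    omega
  · intro i hi h2
    have hn : i < segments.length := by simp at hi; omega
    simp only [List.getElem_zip, List.getElem_map, PySem.List.getElem_enumerate]
    unfold pvEntTrip
    simp only [zero_add]
    refine Prod.ext rfl (Prod.ext ?_ ?_)
    · exact pvPrevElem segments i hn (by simp at hi ⊢; omega)
    · exact pvNextElem segments i hn (by simp at hi ⊢; omega)

-- named copies of the ports' fold bodies (definitionally equal to the lambdas in the ports)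
def pvStepT (segments : List PvSeg) (s : List PvEntry × Int) (ip : Int × PvSeg) :
    List PvEntry × Int :=
  let i := ip.1
  let start := ip.2.1
  let end_ := ip.2.2.1
  if start.1 = end_.1 then
    let before := PySem.List.pyGetD segments (i - 1) pvSegDefault
    let after := PySem.List.pyGetD segments (PySem.Int.mod (i + 1) (segments.length : Int)) pvSegDefault
    (s.1 ++ [(min start.2 end_.2, max start.2 end_.2, end_.1, end_.1,
               before.2.2 == after.2.2)],
     s.2 + (|start.2 - end_.2| + 1))
  else
    let xValue := min start.2 end_.2
    let yValues := PySem.List.sorted [start.1, end_.1] (fun y => y) false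
    (s.1 ++ [(xValue, xValue, PySem.List.pyGetD yValues 0 0 + 1,
               PySem.List.pyGetD yValues 1 0 - 1, true)],
     s.2 + (PySem.List.pyGetD yValues 1 0 - PySem.List.pyGetD yValues 0 0 - 1))

def pvStepU (s : List PvEntry × Int) (t : PvSeg × PvSeg × PvSeg) : List PvEntry × Int :=
  let sy := t.1.1.1; let sx := t.1.1.2
  let ey := t.1.2.1.1; let ex := t.1.2.1.2
  let before := t.2.1; let after := t.2.2
  if sy = ey then
    (s.1 ++ [(min sx ex, max sx ex, ey, ey, before.2.2 == after.2.2)],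
     s.2 + (|sx - ex| + 1))
  else
    (s.1 ++ [(min sx ex, min sx ex, min sy ey + 1, max sy ey - 1, true)],
     s.2 + (max sy ey - min sy ey - 1))

def pvStepV (st : List PvBand × Int) (vline : PvEntry) : List PvBand × Int :=
  st.1.foldl
    (fun (s : List PvBand × Int) line =>
      match segmentLineByLine line.1 (vline.2.2.1, vline.2.2.2.1) with
      | none => (s.1 ++ [line], s.2)
      | some hr =>
        let s' := (s.1 ++ hr.2.map (fun r => (r, line.2.1, line.2.2)) ++
                    [(hr.1, vline.2.1,
                      if vline.2.2.2.2 then !line.2.2 else line.2.2)], s.2)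
        if line.2.2 then
          (s'.1, s'.2 + (hr.1.2 - hr.1.1 + 1) * (vline.1 - line.2.1 - 1))
        else s')
    ([], st.2)

theorem pvStepT_eq (segments : List PvSeg) :
    pvStepT segments = fun s ip =>
      (s.1 ++ [pvEntOf (pvEntTrip segments ip)], s.2 + pvVolOf (pvEntTrip segments ip)) := by
  funext s ip
  unfold pvStepT pvEntOf pvVolOf pvEntTrip
  by_cases hc : ip.2.1.1 = ip.2.2.1.1
  · simp [hc]
  · simp only [hc, if_false]
    rw [pvSortedPair]
    rw [PySem.List.pyGetD_zero_cons,
      (by simp [PySem.List.pyGetD] :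
        PySem.List.pyGetD [min ip.2.1.1 ip.2.2.1.1, max ip.2.1.1 ip.2.2.1.1] 1 (0 : Int) =
          max ip.2.1.1 ip.2.2.1.1)]

theorem pvStepU_eq :
    pvStepU = fun s t => (s.1 ++ [pvEntOf t], s.2 + pvVolOf t) := by
  funext s t
  unfold pvStepU pvEntOf pvVolOf
  by_cases hc : t.1.1.1 = t.1.2.1.1 <;> simp [hc]

theorem pvStepV_eq : pvStepV = pvStepA := by
  funext st vline
  unfold pvStepV
  have hinner : (fun (s : List PvBand × Int) line =>
      match segmentLineByLine line.1 (vline.2.2.1, vline.2.2.2.1) with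
      | none => (s.1 ++ [line], s.2)
      | some hr =>
        let s' := (s.1 ++ hr.2.map (fun r => (r, line.2.1, line.2.2)) ++
                    [(hr.1, vline.2.1,
                      if vline.2.2.2.2 then !line.2.2 else line.2.2)], s.2)
        if line.2.2 then
          (s'.1, s'.2 + (hr.1.2 - hr.1.1 + 1) * (vline.1 - line.2.1 - 1))
        else s') =
      fun s line => (s.1 ++ pvPiecesA vline line, s.2 + pvContribA vline line) := by
    funext s line
    rw [pvSegLBL]
    unfold pvPiecesA pvContribA pvTouch pvRest pvHitA pvContrib
    by_cases ht : line.1.2 < vline.2.2.1 ∨ vline.2.2.2.1 < line.1.1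
    · simp [ht]
    · by_cases h3 : line.1.1 < vline.2.2.1 <;> by_cases h4 : line.1.2 > vline.2.2.2.1 <;>
        by_cases hin : line.2.2 <;> simp [ht, h3, h4, hin]
  rw [hinner, pvFoldlBuild]
  simp [pvStepA]

theorem pvToLines_eq0 (segments : List PvSeg) :
    toLines segments =
      (PySem.List.sorted (((PySem.List.enumerate segments 0).foldl (pvStepT segments) ([], 0)).1)
        pvKey false,
       ((PySem.List.enumerate segments 0).foldl (pvStepT segments) ([], 0)).2) := rfl

theorem pvToLines_eq (segments : List PvSeg) :
    toLines segments = (pvLines segments, pvVol0 segments) := by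
  rw [pvToLines_eq0, pvStepT_eq, pvFoldlBuild, pvFlatMapSingleton]
  unfold pvLines pvVol0
  simp

-- A's result as a fold of pvStepA from the initial band
def pvStart (lines : List PvEntry) : PvBand :=
  (((PySem.List.min? (lines.map (fun x => x.2.2.1)) (fun y => y)).getD 0,
    (PySem.List.max? (lines.map (fun x => x.2.2.2.1)) (fun y => y)).getD 0),
   (PySem.List.pyGetD lines 0 pvEntryDefault).1 - 1, false)

theorem pvCalc_eq0 (segments : List PvSeg) :
    calcVolume segments =
      ((toLines segments).1.foldl pvStepV
        ([pvStart (toLines segments).1], (toLines segments).2)).2 := rfl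

theorem pvCalc_eq (segments : List PvSeg) :
    calcVolume segments =
      ((pvLines segments).foldl pvStepA
        ([pvStart (pvLines segments)], pvVol0 segments)).2 := by
  rw [pvCalc_eq0, pvToLines_eq, pvStepV_eq]

-- B's result in terms of pvLines / pvVol0 / pvRowC
def pvCuts (lines : List PvEntry) : List Int :=
  PySem.List.sorted
    (PySem.Set.ofList (lines.flatMap (fun l => [l.2.2.1, l.2.2.2.1 + 1])))
    (fun y => y) false

theorem pvScanFold (lines : List PvEntry) (c d : Int) :
    ∀ (px : Int) (ins : Bool) (v : Int),
      (lines.foldl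
        (fun (s : Int × Bool × Int) l =>
          if l.2.2.1 ≤ c ∧ d ≤ l.2.2.2.1 + 1 then
            (l.2.1, s.2.1 != l.2.2.2.2,
             s.2.2 + (if s.2.1 then (d - c) * (l.1 - s.1 - 1) else 0))
          else s)
        (px, ins, v)).2.2 = v + (d - c) * pvRowC lines c d (px, ins) := by
  induction lines with
  | nil => intro px ins v; simp [pvRowC]
  | cons L ls ih =>
    intro px ins v
    simp only [List.foldl_cons, pvRowC]
    by_cases h : L.2.2.1 ≤ c ∧ d ≤ L.2.2.2.1 + 1
    · simp only [h, ih]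
      cases hins : ins
      · simp
      · simp [mul_add]; ring
    · simp only [h, if_false, ih]


theorem pvSumIoc (a b c : Int) (f : Int → Int) (h1 : a ≤ b) (h2 : b ≤ c) :
    (Finset.Ioc a b).sum f + (Finset.Ioc b c).sum f = (Finset.Ioc a c).sum f := by
  rw [← Finset.sum_union (Finset.Ioc_disjoint_Ioc_of_le le_rfl),
    Finset.Ioc_union_Ioc_eq_Ioc h1 h2]

theorem pvSumConst (a b v : Int) : (Finset.Ioc a b).sum (fun _ => v) = (b - a).toNat * v := by
  rw [Finset.sum_const, Int.card_Ioc, nsmul_eq_mul]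

theorem pvSumFlatMap {α β : Type} (l : List α) (f : α → List β) (g : β → Int) :
    ((l.flatMap f).map g).sum = (l.map (fun b => ((f b).map g).sum)).sum := by
  induction l with
  | nil => rfl
  | cons a t ih => simp [List.flatMap_cons, ih]

theorem pvCalcAlt_eq0 (segments : List PvSeg) :
    calcVolume_alt segments =
      (((pvCuts (PySem.List.sorted
            (((segments.zip
              ((PySem.List.slice segments (some (-1)) none ++
                PySem.List.slice segments none (some (-1))).zip
               (PySem.List.slice segments (some 1) none ++
                PySem.List.slice segments none (some 1)))).foldl pvStepU ([], 0)).1)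
            pvKey false)).zip
        (pvCuts (PySem.List.sorted
            (((segments.zip
              ((PySem.List.slice segments (some (-1)) none ++
                PySem.List.slice segments none (some (-1))).zip
               (PySem.List.slice segments (some 1) none ++
                PySem.List.slice segments none (some 1)))).foldl pvStepU ([], 0)).1)
            pvKey false)).tail).foldl
        (fun (v : Int) cd =>
          ((PySem.List.sorted
            (((segments.zip
              ((PySem.List.slice segments (some (-1)) none ++
                PySem.List.slice segments none (some (-1))).zip
               (PySem.List.slice segments (some 1) none ++
                PySem.List.slice segments none (some 1)))).foldl pvStepU ([], 0)).1)
            pvKey false).foldl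
            (fun (s : Int × Bool × Int) l =>
              if l.2.2.1 ≤ cd.1 ∧ cd.2 ≤ l.2.2.2.1 + 1 then
                (l.2.1, s.2.1 != l.2.2.2.2,
                 s.2.2 + (if s.2.1 then (cd.2 - cd.1) * (l.1 - s.1 - 1) else 0))
              else s)
            ((PySem.List.pyGetD (PySem.List.sorted
            (((segments.zip
              ((PySem.List.slice segments (some (-1)) none ++
                PySem.List.slice segments none (some (-1))).zip
               (PySem.List.slice segments (some 1) none ++
                PySem.List.slice segments none (some 1)))).foldl pvStepU ([], 0)).1)
            pvKey false) 0 pvEntryDefault).1 - 1, false, v)).2.2)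
        (((segments.zip
              ((PySem.List.slice segments (some (-1)) none ++
                PySem.List.slice segments none (some (-1))).zip
               (PySem.List.slice segments (some 1) none ++
                PySem.List.slice segments none (some 1)))).foldl pvStepU ([], 0)).2)) := rfl

theorem pvSortedBuilt (segments : List PvSeg) :
    PySem.List.sorted
        (((segments.zip
          ((PySem.List.slice segments (some (-1)) none ++
            PySem.List.slice segments none (some (-1))).zip
           (PySem.List.slice segments (some 1) none ++
            PySem.List.slice segments none (some 1)))).foldl pvStepU ([], 0)).1)
        pvKey false = pvLines segments := by
  rw [pvZipRot, pvStepU_eq, List.foldl_map, pvFoldlBuild, pvFlatMapSingleton]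
  unfold pvLines
  simp

theorem pvBuiltVol (segments : List PvSeg) :
    ((segments.zip
          ((PySem.List.slice segments (some (-1)) none ++
            PySem.List.slice segments none (some (-1))).zip
           (PySem.List.slice segments (some 1) none ++
            PySem.List.slice segments none (some 1)))).foldl pvStepU ([], 0)).2 =
      pvVol0 segments := by
  rw [pvZipRot, pvStepU_eq, List.foldl_map, pvFoldlBuild]
  unfold pvVol0
  simp

theorem pvCalcAlt_eq (segments : List PvSeg) :
    calcVolume_alt segments =
      (((pvCuts (pvLines segments)).zip (pvCuts (pvLines segments)).tail).foldl
        (fun (v : Int) cd =>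
          v + (cd.2 - cd.1) * pvRowC (pvLines segments) cd.1 cd.2
                ((PySem.List.pyGetD (pvLines segments) 0 pvEntryDefault).1 - 1, false))
        (pvVol0 segments)) := by
  rw [pvCalcAlt_eq0, pvSortedBuilt, pvBuiltVol]
  have hstep : (fun (v : Int) (cd : Int × Int) =>
      ((pvLines segments).foldl
        (fun (s : Int × Bool × Int) l =>
          if l.2.2.1 ≤ cd.1 ∧ cd.2 ≤ l.2.2.2.1 + 1 then
            (l.2.1, s.2.1 != l.2.2.2.2,
             s.2.2 + (if s.2.1 then (cd.2 - cd.1) * (l.1 - s.1 - 1) else 0))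
          else s)
        ((PySem.List.pyGetD (pvLines segments) 0 pvEntryDefault).1 - 1, false, v)).2.2) =
      (fun (v : Int) (cd : Int × Int) =>
        v + (cd.2 - cd.1) * pvRowC (pvLines segments) cd.1 cd.2
              ((PySem.List.pyGetD (pvLines segments) 0 pvEntryDefault).1 - 1, false)) := by
    funext v cd
    exact pvScanFold (pvLines segments) cd.1 cd.2 _ _ _
  rw [hstep]

-- the A-side fold distributes over the band list
theorem pvFoldA_eq (ls : List PvEntry) :
    ∀ (bs : List PvBand) (v : Int),
      (ls.foldl pvStepA (bs, v)).2 = v + (bs.map (pvF ls)).sum := by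
  induction ls with
  | nil => intro bs v; simp [pvF]
  | cons L ls ih =>
    intro bs v
    simp only [List.foldl_cons, pvStepA, ih, pvF]
    rw [pvSumFlatMap]
    have : (bs.map (fun b => pvContribA L b + ((pvPiecesA L b).map (pvF ls)).sum)).sum =
        (bs.map (pvContribA L)).sum + (bs.map (fun b => ((pvPiecesA L b).map (pvF ls)).sum)).sum := by
      induction bs with
      | nil => rfl
      | cons b t ihb => simp [ihb]; ring
    rw [this]; ring

-- lines produced by the builder have y1 ≥ y0 - 1
theorem pvLinesOK (segments : List PvSeg) :
    ∀ L ∈ pvLines segments, L.2.2.1 - 1 ≤ L.2.2.2.1 := by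
  intro L hL
  rw [pvLines, PySem.List.mem_sorted, List.mem_map] at hL
  obtain ⟨ip, _, hEq⟩ := hL
  subst hEq
  unfold pvEntOf
  set t := pvEntTrip segments ip
  by_cases hc : t.1.1.1 = t.1.2.1.1
  · simp [hc]
  · have : min t.1.1.1 t.1.2.1.1 < max t.1.1.1 t.1.2.1.1 := by
      rcases lt_or_gt_of_ne hc with h | h <;> simp [min_def, max_def] <;> omega
    simp only [hc, if_false]
    omega

-- a band's total contribution is the sum of its rows' contributions
theorem pvFsplit (ls : List PvEntry) (hok : ∀ L ∈ ls, L.2.2.1 - 1 ≤ L.2.2.2.1) :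
    ∀ (s e px : Int) (ins : Bool), s - 1 ≤ e →
      pvF ls ((s, e), px, ins) =
        (Finset.Ioc (s - 1) e).sum (fun r => pvRow ls r (px, ins)) := by
  induction ls with
  | nil => intro s e px ins h; simp [pvF, pvRow]
  | cons L ls ih =>
    obtain ⟨x0, x1, y0, y1, flag⟩ := L
    intro s e px ins hse
    have hokL : y0 - 1 ≤ y1 := hok (x0, x1, y0, y1, flag) (List.mem_cons_self ..)
    have hokls : ∀ L' ∈ ls, L'.2.2.1 - 1 ≤ L'.2.2.2.1 := fun L' h => hok L' (by simp [h])
    by_cases ht : e < y0 ∨ y1 < s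
    · -- the band misses this line: every row misses it too
      have htouch : pvTouch y0 y1 ((s, e), px, ins) = false := by
        simp [pvTouch]; omega
      have hmiss : pvF ((x0, x1, y0, y1, flag) :: ls) ((s, e), px, ins) =
          pvF ls ((s, e), px, ins) := by
        show pvContribA _ _ + ((pvPiecesA _ _).map (pvF ls)).sum = _
        unfold pvPiecesA pvContribA
        rw [htouch]
        simp
      rw [hmiss, ih hokls s e px ins hse]
      apply Finset.sum_congr rfl
      intro r hr; rw [Finset.mem_Ioc] at hr
      show pvRow ls r (px, ins) = pvRow ((x0, x1, y0, y1, flag) :: ls) r (px, ins)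
      rw [pvRow, if_neg (by simp; omega)]
    · -- the band is hit: rows split into below / inside / above the line
      have htouch : pvTouch y0 y1 ((s, e), px, ins) = true := by
        simp [pvTouch]; omega
      have hhs : s - 1 ≤ max s y0 - 1 := by omega
      have hhe : max s y0 - 1 ≤ min e y1 := by omega
      have hee : min e y1 ≤ e := by omega
      -- LHS in pieces
      have hbridge : (if flag then !ins else ins) = (ins != flag) := by
        cases flag <;> cases ins <;> rfl
      have hrest : ((pvRest y0 y1 ((s, e), px, ins)).map (pvF ls)).sum =
          (if s < y0 then pvF ls ((s, y0 - 1), px, ins) else 0) +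
          (if e > y1 then pvF ls ((y1 + 1, e), px, ins) else 0) := by
        unfold pvRest
        split_ifs <;> simp
      have hLHS : pvF ((x0, x1, y0, y1, flag) :: ls) ((s, e), px, ins) =
          (if ins then (min e y1 - max s y0 + 1) * (x0 - px - 1) else 0) +
          ((if s < y0 then pvF ls ((s, y0 - 1), px, ins) else 0) +
           (if e > y1 then pvF ls ((y1 + 1, e), px, ins) else 0) +
           pvF ls ((max s y0, min e y1), x1, ins != flag)) := by
        show pvContribA _ _ + ((pvPiecesA _ _).map (pvF ls)).sum = _
        unfold pvPiecesA pvContribA pvContrib pvHitA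
        rw [htouch]
        simp only [if_true, List.map_append, List.sum_append, hrest, List.map_cons,
          List.map_nil, List.sum_cons, List.sum_nil]
        rw [hbridge]
        ring
      rw [hLHS]
      -- RHS in three Ioc blocks
      rw [← pvSumIoc (s - 1) (min e y1) e _ (by omega) hee,
          ← pvSumIoc (s - 1) (max s y0 - 1) (min e y1) _ (by omega) hhe]
      -- low block
      have hlow : (Finset.Ioc (s - 1) (max s y0 - 1)).sum
            (fun r => pvRow ((x0, x1, y0, y1, flag) :: ls) r (px, ins)) =
          (if s < y0 then pvF ls ((s, y0 - 1), px, ins) else 0) := by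
        by_cases hsy : s < y0
        · have hmx : max s y0 = y0 := by omega
          rw [hmx, if_pos hsy, ih hokls s (y0 - 1) px ins (by omega)]
          apply Finset.sum_congr rfl
          intro r hr; rw [Finset.mem_Ioc] at hr
          show pvRow ((x0, x1, y0, y1, flag) :: ls) r (px, ins) = pvRow ls r (px, ins)
          rw [pvRow, if_neg (by simp; omega)]
        · have hmx : max s y0 = s := by omega
          rw [hmx, if_neg hsy]
          rw [show Finset.Ioc (s - 1) (s - 1) = ∅ by simp]
          simp
      -- high block
      have hhigh : (Finset.Ioc (min e y1) e).sum
            (fun r => pvRow ((x0, x1, y0, y1, flag) :: ls) r (px, ins)) =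
          (if e > y1 then pvF ls ((y1 + 1, e), px, ins) else 0) := by
        by_cases hey : e > y1
        · have hmn : min e y1 = y1 := by omega
          rw [hmn, if_pos hey, ih hokls (y1 + 1) e px ins (by omega),
            show y1 + 1 - 1 = y1 from by ring]
          apply Finset.sum_congr rfl
          intro r hr; rw [Finset.mem_Ioc] at hr
          show pvRow ((x0, x1, y0, y1, flag) :: ls) r (px, ins) = pvRow ls r (px, ins)
          rw [pvRow, if_neg (by simp; omega)]
        · have hmn : min e y1 = e := by omega
          rw [hmn, if_neg hey]
          rw [show Finset.Ioc e e = ∅ by simp]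
          simp
      -- middle block
      have hmid : (Finset.Ioc (max s y0 - 1) (min e y1)).sum
            (fun r => pvRow ((x0, x1, y0, y1, flag) :: ls) r (px, ins)) =
          (if ins then (min e y1 - max s y0 + 1) * (x0 - px - 1) else 0) +
          pvF ls ((max s y0, min e y1), x1, ins != flag) := by
        have hstep : ∀ r ∈ Finset.Ioc (max s y0 - 1) (min e y1),
            pvRow ((x0, x1, y0, y1, flag) :: ls) r (px, ins) =
              (if ins then x0 - px - 1 else 0) + pvRow ls r (x1, ins != flag) := by
          intro r hr; rw [Finset.mem_Ioc] at hr
          rw [pvRow, if_pos (by simp; omega)]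
        rw [Finset.sum_congr rfl hstep, Finset.sum_add_distrib, pvSumConst,
          ih hokls (max s y0) (min e y1) x1 (ins != flag) (by omega)]
        have hcard : (((min e y1 - (max s y0 - 1)).toNat : Int)) = min e y1 - max s y0 + 1 := by
          omega
        congr 1
        push_cast [hcard]
        by_cases hins : ins
        · simp [hins]
        · simp [hins]
      rw [hlow, hhigh, hmid]
      ring

-- rows of one strip all behave like the strip-condition scan
theorem pvRowConst (ls : List PvEntry) (c d : Int)
    (hadj : ∀ L ∈ ls, ¬(c < L.2.2.1 ∧ L.2.2.1 < d) ∧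
                      ¬(c < L.2.2.2.1 + 1 ∧ L.2.2.2.1 + 1 < d)) :
    ∀ (r : Int), c ≤ r → r < d → ∀ st, pvRow ls r st = pvRowC ls c d st := by
  induction ls with
  | nil => intro r _ _ st; rfl
  | cons L ls ih =>
    obtain ⟨x0, x1, y0, y1, flag⟩ := L
    intro r hcr hrd st
    have hL := hadj (x0, x1, y0, y1, flag) (List.mem_cons_self ..)
    have hls : ∀ L' ∈ ls, ¬(c < L'.2.2.1 ∧ L'.2.2.1 < d) ∧
        ¬(c < L'.2.2.2.1 + 1 ∧ L'.2.2.2.1 + 1 < d) := fun L' h => hadj L' (by simp [h])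
    simp only at hL
    have hiff : ((y0 ≤ r ∧ r ≤ y1)) ↔ (y0 ≤ c ∧ d ≤ y1 + 1) := by omega
    rw [pvRow, pvRowC]
    dsimp only
    by_cases h : y0 ≤ c ∧ d ≤ y1 + 1
    · rw [if_pos (show y0 ≤ r ∧ r ≤ y1 by omega), if_pos h, ih hls r hcr hrd]
    · rw [if_neg (show ¬(y0 ≤ r ∧ r ≤ y1) by omega), if_neg h]
      exact ih hls r hcr hrd st

-- strictly sorted list: head is ≤ every member, every member ≤ last
theorem pvHeadLe (l : List Int) (hp : l.Pairwise (· < ·)) (h : l ≠ []) :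
    ∀ x ∈ l, l.head h ≤ x := by
  cases l with
  | nil => exact absurd rfl h
  | cons a t =>
    intro x hx
    rcases List.mem_cons.mp hx with h1 | h1
    · simp [h1]
    · exact le_of_lt ((List.pairwise_cons.mp hp).1 x h1)

theorem pvLeLast (l : List Int) (hp : l.Pairwise (· < ·)) (h : l ≠ []) :
    ∀ x ∈ l, x ≤ l.getLast h := by
  induction l with
  | nil => exact absurd rfl h
  | cons a t ih =>
    intro x hx
    cases t with
    | nil => simp at hx; simp [hx]
    | cons b u =>
      rw [List.getLast_cons (by simp)]
      rcases List.mem_cons.mp hx with h1 | h1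
      · subst h1
        calc x ≤ b := le_of_lt ((List.pairwise_cons.mp hp).1 b (by simp))
          _ ≤ (b :: u).getLast (by simp) := ih (List.pairwise_cons.mp hp).2 (by simp) b (by simp)
      · exact ih (List.pairwise_cons.mp hp).2 (by simp) x h1

-- telescoping the strip sums over consecutive cuts
theorem pvChain (ls : List PvEntry) (st0 : Int × Bool) :
    ∀ (rest : List Int) (c : Int) (v : Int),
      (c :: rest).Pairwise (· < ·) →
      (∀ L ∈ ls, ∀ x ∈ [L.2.2.1, L.2.2.2.1 + 1], x ∈ (c :: rest) ∨ x ≤ c) →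
      ((c :: rest).zip rest).foldl
        (fun (v : Int) cd => v + (cd.2 - cd.1) * pvRowC ls cd.1 cd.2 st0) v =
      v + (Finset.Ioc (c - 1) ((c :: rest).getLast (by simp) - 1)).sum
            (fun r => pvRow ls r st0) := by
  intro rest
  induction rest with
  | nil => intro c v _ _; simp
  | cons d rest ih =>
    intro c v hp hmem
    have hcd : c < d := (List.pairwise_cons.mp hp).1 d (by simp)
    have hp' : (d :: rest).Pairwise (· < ·) := (List.pairwise_cons.mp hp).2
    have hmem' : ∀ L ∈ ls, ∀ x ∈ [L.2.2.1, L.2.2.2.1 + 1], x ∈ (d :: rest) ∨ x ≤ d := by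
      intro L hL x hx
      rcases hmem L hL x hx with h | h
      · rcases List.mem_cons.mp h with h | h
        · right; omega
        · left; exact h
      · right; omega
    have hgtd : ∀ x ∈ rest, d < x := (List.pairwise_cons.mp hp').1
    have hnotin : ∀ x, x ∈ (c :: d :: rest) ∨ x ≤ c → ¬(c < x ∧ x < d) := by
      rintro x hx ⟨h1, h2⟩
      rcases hx with hx | hx
      · rcases List.mem_cons.mp hx with h | h
        · omega
        · rcases List.mem_cons.mp h with h | h
          · omega
          · have := hgtd x h; omega
      · omega
    have hadj : ∀ L ∈ ls, ¬(c < L.2.2.1 ∧ L.2.2.1 < d) ∧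
        ¬(c < L.2.2.2.1 + 1 ∧ L.2.2.2.1 + 1 < d) := by
      intro L hL
      exact ⟨hnotin _ (hmem L hL L.2.2.1 (by simp)),
             hnotin _ (hmem L hL (L.2.2.2.1 + 1) (by simp))⟩
    have hstrip : (Finset.Ioc (c - 1) (d - 1)).sum (fun r => pvRow ls r st0) =
        (d - c) * pvRowC ls c d st0 := by
      have hconst : ∀ r ∈ Finset.Ioc (c - 1) (d - 1), pvRow ls r st0 = pvRowC ls c d st0 := by
        intro r hr; rw [Finset.mem_Ioc] at hr
        exact pvRowConst ls c d hadj r (by omega) (by omega) st0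
      rw [Finset.sum_congr rfl hconst, pvSumConst]
      have hc : (((d - 1 - (c - 1)).toNat : Int)) = d - c := by omega
      rw [show ((d - 1 - (c - 1)).toNat : Int) * pvRowC ls c d st0 =
            (d - c) * pvRowC ls c d st0 from by rw [hc]]
    have hlast : d ≤ (d :: rest).getLast (by simp) :=
      pvLeLast _ hp' (by simp) d (by simp)
    show ((d :: rest).zip rest).foldl _ (v + (d - c) * pvRowC ls c d st0) = _
    rw [ih d (v + (d - c) * pvRowC ls c d st0) hp' hmem']
    rw [show ((c :: d :: rest).getLast (by simp)) = ((d :: rest).getLast (by simp)) from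
          List.getLast_cons (by simp)]
    rw [← pvSumIoc (c - 1) (d - 1) ((d :: rest).getLast (by simp) - 1) _ (by omega) (by omega),
        hstrip]
    ring

-- ===== VERDICT (by name: the statement is the Claim_ definition above) =====
theorem calcVolume_spec : Claim_equal_calcVolume := by
  intro segments _ hpre
  unfold Spec_calcVolume
  rw [pvCalc_eq, pvCalcAlt_eq]
  have hok := pvLinesOK segments
  have hlen : (pvLines segments).length = segments.length := by
    unfold pvLines
    rw [PySem.List.length_sorted, List.length_map, PySem.List.length_enumerate]
  have hlne : pvLines segments ≠ [] := by
    intro h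
    rw [h] at hlen
    exact hpre (List.length_eq_zero_iff.mp hlen.symm)
  obtain ⟨mY, hmY⟩ : ∃ m,
      PySem.List.min? ((pvLines segments).map (fun x => x.2.2.1)) (fun y => y) = some m := by
    cases hc : PySem.List.min? ((pvLines segments).map (fun x => x.2.2.1)) (fun y => y) with
    | none =>
      rw [PySem.List.min?_eq_none_iff, List.map_eq_nil_iff] at hc
      exact absurd hc hlne
    | some m => exact ⟨m, rfl⟩
  obtain ⟨MY, hMY⟩ : ∃ m,
      PySem.List.max? ((pvLines segments).map (fun x => x.2.2.2.1)) (fun y => y) = some m := by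
    cases hc : PySem.List.max? ((pvLines segments).map (fun x => x.2.2.2.1)) (fun y => y) with
    | none =>
      rw [PySem.List.max?_eq_none_iff, List.map_eq_nil_iff] at hc
      exact absurd hc hlne
    | some m => exact ⟨m, rfl⟩
  have hminle : ∀ L ∈ pvLines segments, mY ≤ L.2.2.1 := by
    intro L hL
    exact PySem.List.min?_isMin hmY L.2.2.1 (List.mem_map_of_mem (f := fun x => x.2.2.1) hL)
  have hmaxge : ∀ L ∈ pvLines segments, L.2.2.2.1 ≤ MY := by
    intro L hL
    exact PySem.List.max?_isMax hMY L.2.2.2.1 (List.mem_map_of_mem (f := fun x => x.2.2.2.1) hL)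
  obtain ⟨L0, hL0mem, hL0⟩ : ∃ L ∈ pvLines segments, L.2.2.1 = mY := by
    have := PySem.List.min?_mem hmY
    rw [List.mem_map] at this
    obtain ⟨L, hL, hEq⟩ := this
    exact ⟨L, hL, hEq⟩
  obtain ⟨L1, hL1mem, hL1⟩ : ∃ L ∈ pvLines segments, L.2.2.2.1 = MY := by
    have := PySem.List.max?_mem hMY
    rw [List.mem_map] at this
    obtain ⟨L, hL, hEq⟩ := this
    exact ⟨L, hL, hEq⟩
  have hmm : mY - 1 ≤ MY := by
    have h1 := hok L0 hL0mem
    have h2 := hmaxge L0 hL0mem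
    omega
  -- A's sweep is the row sum over the full band
  have hA : ((pvLines segments).foldl pvStepA
        ([pvStart (pvLines segments)], pvVol0 segments)).2 =
      pvVol0 segments + (Finset.Ioc (mY - 1) MY).sum
        (fun r => pvRow (pvLines segments) r
          ((PySem.List.pyGetD (pvLines segments) 0 pvEntryDefault).1 - 1, false)) := by
    rw [pvFoldA_eq]
    unfold pvStart
    rw [hmY, hMY]
    simp only [Option.getD_some, List.map_cons, List.map_nil, List.sum_cons, List.sum_nil,
      add_zero]
    rw [pvFsplit (pvLines segments) hok mY MY _ false hmm]
  rw [hA]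
  -- B's strip fold telescopes to the same row sum
  have hpw : (pvCuts (pvLines segments)).Pairwise (· < ·) := by
    unfold pvCuts
    exact PySem.List.sorted_ofList_pairwise_lt _
  have hmemc : ∀ x, x ∈ pvCuts (pvLines segments) ↔
      ∃ L ∈ pvLines segments, x = L.2.2.1 ∨ x = L.2.2.2.1 + 1 := by
    intro x
    unfold pvCuts
    rw [PySem.List.mem_sorted, PySem.Set.mem_ofList, List.mem_flatMap]
    constructor
    · rintro ⟨L, hL, hx⟩
      rcases List.mem_cons.mp hx with h | h
      · exact ⟨L, hL, Or.inl h⟩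
      · rcases List.mem_cons.mp h with h | h
        · exact ⟨L, hL, Or.inr h⟩
        · simp at h
    · rintro ⟨L, hL, h | h⟩
      · exact ⟨L, hL, by simp [h]⟩
      · exact ⟨L, hL, by simp [h]⟩
  have hcne : pvCuts (pvLines segments) ≠ [] := by
    intro h
    have := (hmemc mY).mpr ⟨L0, hL0mem, Or.inl hL0.symm⟩
    rw [h] at this
    simp at this
  cases hcuts : pvCuts (pvLines segments) with
  | nil => exact absurd hcuts hcne
  | cons ch ct =>
    rw [hcuts] at hpw
    have hmem' : ∀ L ∈ pvLines segments, ∀ x ∈ [L.2.2.1, L.2.2.2.1 + 1],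
        x ∈ (ch :: ct) ∨ x ≤ ch := by
      intro L hL x hx
      left
      rw [← hcuts, hmemc]
      rcases List.mem_cons.mp hx with h | h
      · exact ⟨L, hL, Or.inl h⟩
      · rcases List.mem_cons.mp h with h | h
        · exact ⟨L, hL, Or.inr h⟩
        · simp at h
    rw [show (ch :: ct).tail = ct from rfl,
      pvChain (pvLines segments) _ ct ch (pvVol0 segments) hpw hmem']
    -- identify the cut interval with A's band
    have hbound : ∀ x, x ∈ (ch :: ct) → mY ≤ x ∧ x ≤ MY + 1 := by
      intro x hx
      rw [← hcuts, hmemc] at hx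
      obtain ⟨L, hL, h | h⟩ := hx
      · have h1 := hminle L hL
        have h2 := hmaxge L hL
        have h3 := hok L hL
        omega
      · have h1 := hminle L hL
        have h2 := hmaxge L hL
        have h3 := hok L hL
        omega
    have hch : ch = mY := by
      have h1 := (hbound ch (by simp)).1
      have h2 : ch ≤ mY := by
        have := pvHeadLe (ch :: ct) hpw (by simp) mY
          (by rw [← hcuts, hmemc]; exact ⟨L0, hL0mem, Or.inl hL0.symm⟩)
        simpa using this
      omega
    have hlast : (ch :: ct).getLast (by simp) = MY + 1 := by
      have h1 := (hbound _ (List.getLast_mem (l := ch :: ct) (by simp))).2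
      have h2 : MY + 1 ≤ (ch :: ct).getLast (by simp) := by
        apply pvLeLast (ch :: ct) hpw (by simp)
        rw [← hcuts, hmemc]
        exact ⟨L1, hL1mem, Or.inr (by omega)⟩
      omega
    rw [hlast, hch, show MY + 1 - 1 = MY from by ring]
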